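-- pv_equiv track=rewrite | github.com/GAKiknadze/imagepixelation | piximage.py | get_avg_color
-- ===== SOURCE A (Python) =====
-- def get_avg_color(pixels: list):
-- 	rgb = []
-- 	size = len(pixels)
-- 	if size == 0:
-- 		return [0, 0, 0]
-- 	i = 0
-- 	while i < 3:
-- 		v = 0
-- 		for color in pixels:
-- 			v += color[i]
-- 		rgb.append(v // size)
-- 		i += 1
-- 	return rgb
-- ===== SOURCE B (Python) =====
-- def get_avg_color(pixels: list):
--     size = len(pixels)
--     if size == 0:
--         return [0, 0, 0]
--     r = g = b = 0
--     for color in pixels: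
--         r += color[0]
--         g += color[1]
--         b += color[2]
--     return [r // size, g // size, b // size]
-- ===== Notes on version B (the rewrite author's own statement) =====
-- stated objective: simpler
-- what changed: Replaces A's three separate scans of the pixel list (while i<3 over channels, each with a full for-loop) by one single pass maintaining three running sums.
import Mathlib
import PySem

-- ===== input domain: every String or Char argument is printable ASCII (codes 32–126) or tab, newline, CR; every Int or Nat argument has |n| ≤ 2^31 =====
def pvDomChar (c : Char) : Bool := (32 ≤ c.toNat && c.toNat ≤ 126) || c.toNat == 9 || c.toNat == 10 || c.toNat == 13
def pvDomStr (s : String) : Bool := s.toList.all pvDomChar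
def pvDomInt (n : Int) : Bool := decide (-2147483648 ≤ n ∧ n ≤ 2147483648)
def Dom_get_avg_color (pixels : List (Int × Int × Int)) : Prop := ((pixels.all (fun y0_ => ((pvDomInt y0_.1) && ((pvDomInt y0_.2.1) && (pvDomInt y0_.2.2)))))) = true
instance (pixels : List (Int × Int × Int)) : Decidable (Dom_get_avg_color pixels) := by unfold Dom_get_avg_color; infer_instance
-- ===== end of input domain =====

-- B replaces A's three per-channel scans of the pixel list by one single pass with three running sums (simpler).

-- ===== PORT A =====
-- color[i] for i = 0,1,2 on an (r,g,b) tuple (exact: A only uses these indices)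
def pvComp (c : Int × Int × Int) (i : Nat) : Int :=
  match i with
  | 0 => c.1
  | 1 => c.2.1
  | _ => c.2.2

-- the 'while i < 3' loop of A, appending one channel average per iteration
def pvAWhile (pixels : List (Int × Int × Int)) (size : Int) (i : Nat) (rgb : List Int) : List Int :=
  if i < 3 then
    pvAWhile pixels size (i + 1)
      (rgb ++ [PySem.Int.floordiv (pixels.foldl (fun v color => v + pvComp color i) 0) size])
  else rgb
termination_by 3 - i

def get_avg_color (pixels : List (Int × Int × Int)) : List Int :=
  let size : Int := pixels.length
  if size = 0 then [0, 0, 0]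
  else pvAWhile pixels size 0 []

-- ===== PORT B =====
def get_avg_color_alt (pixels : List (Int × Int × Int)) : List Int :=
  let size : Int := pixels.length
  if size = 0 then [0, 0, 0]
  else
    let s := pixels.foldl (fun acc color =>
      (acc.1 + color.1, acc.2.1 + color.2.1, acc.2.2 + color.2.2)) ((0 : Int), (0 : Int), (0 : Int))
    [PySem.Int.floordiv s.1 size, PySem.Int.floordiv s.2.1 size, PySem.Int.floordiv s.2.2 size]

-- ===== PRECONDITION & SPEC =====
def Spec_get_avg_color (pixels : List (Int × Int × Int)) (out : List Int) : Prop := out = get_avg_color_alt pixels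
instance (pixels : List (Int × Int × Int)) (out : List Int) : Decidable (Spec_get_avg_color pixels out) := by unfold Spec_get_avg_color; infer_instance

-- ===== CLAIM (what is proved, stated in full; the proofs are below) =====
def Claim_equal_get_avg_color : Prop := ∀ (pixels : List (Int × Int × Int)), Dom_get_avg_color pixels → Spec_get_avg_color pixels (get_avg_color pixels)

-- ===== LEMMAS AND PROOFS =====

-- B's single fold computes the three per-channel sums of A's three folds
theorem pvFold_triple (pixels : List (Int × Int × Int)) (r g b : Int) :
    pixels.foldl (fun acc color =>
      (acc.1 + color.1, acc.2.1 + color.2.1, acc.2.2 + color.2.2)) (r, g, b) =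
    (pixels.foldl (fun v c => v + pvComp c 0) r,
     pixels.foldl (fun v c => v + pvComp c 1) g,
     pixels.foldl (fun v c => v + pvComp c 2) b) := by
  induction pixels generalizing r g b with
  | nil => rfl
  | cons hd tl ih => simp [List.foldl, pvComp, ih]

theorem get_avg_color_spec : Claim_equal_get_avg_color := by
  intro pixels _
  unfold Spec_get_avg_color get_avg_color get_avg_color_alt
  by_cases h : (pixels.length : Int) = 0
  · simp [h]
  · simp only [h, if_false]
    rw [pvFold_triple]
    simp [pvAWhile]
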